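-- pv_equiv track=rewrite | github.com/Ammoniya/experiments | convert_cluster_samples_to_csv.py | sanitize_header
-- ===== SOURCE A (Python) =====
-- from typing import Any, Dict, Iterable, List, Sequence, Set, Tuple
--
-- def sanitize_header(text: str) -> str:
--     text = text.strip().lower()
--     chars: List[str] = []
--     prev_underscore = False
--     for char in text:
--         if char.isalnum():
--             chars.append(char)
--             prev_underscore = False
--         else:
--             if not prev_underscore:
--                 chars.append("_")
--                 prev_underscore = True
--     sanitized = "".join(chars).strip("_")
--     return sanitized or "field"
-- ===== SOURCE B (Python) =====
-- def sanitize_header(text: str) -> str: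
--     spaced = "".join(c if c.isalnum() else " " for c in text.lower())
--     return "_".join(spaced.split()) or "field"
-- ===== Notes on version B (the rewrite author's own statement) =====
-- stated objective: idiomatic
-- what changed: Replaces the char-by-char state machine (prev_underscore flag plus underscore-stripping) by tokenization: map every non-alphanumeric char of the lowercased text to a space, let str.split() extract the words, and join them with underscores, falling back to 'field' when no word remains.
import Mathlib
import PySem

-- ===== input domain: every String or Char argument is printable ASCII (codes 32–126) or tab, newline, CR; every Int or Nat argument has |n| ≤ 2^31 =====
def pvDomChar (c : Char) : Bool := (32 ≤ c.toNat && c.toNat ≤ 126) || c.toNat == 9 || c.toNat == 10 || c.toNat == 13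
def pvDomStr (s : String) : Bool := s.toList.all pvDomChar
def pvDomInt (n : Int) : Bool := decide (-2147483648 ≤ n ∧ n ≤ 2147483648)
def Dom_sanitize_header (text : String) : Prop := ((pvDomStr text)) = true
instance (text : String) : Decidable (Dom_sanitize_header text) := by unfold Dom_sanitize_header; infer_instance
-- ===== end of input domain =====

-- B replaces A's char-by-char state machine (prev_underscore flag + final underscore strip) by
-- tokenization: non-alphanumeric chars of the lowercased text become spaces, split() extracts the
-- words, which are joined with underscores ("field" when no word remains); objective: idiomatic.

-- ===== PORT A =====
def sanitize_header (text : String) : String :=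
  let t := PySem.Str.lower (PySem.Str.strip text)
  let st := t.toList.foldl (fun (st : List Char × Bool) char =>
      if PySem.Chars.isalnum char then (st.1 ++ [char], false)
      else if st.2 = false then (st.1 ++ ['_'], true) else st) ([], false)
  let sanitized := PySem.Str.stripChars (String.ofList st.1) "_"
  if sanitized = "" then "field" else sanitized

-- ===== PORT B =====
def sanitize_header_alt (text : String) : String :=
  let spaced := String.ofList ((PySem.Str.lower text).toList.map
      (fun c => if PySem.Chars.isalnum c then c else ' '))
  let joined := PySem.Str.join "_" (PySem.Str.split₀ spaced)
  if joined = "" then "field" else joined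

-- ===== PRECONDITION & SPEC =====
def Spec_sanitize_header (text : String) (out : String) : Prop := out = sanitize_header_alt text
instance (text : String) (out : String) : Decidable (Spec_sanitize_header text out) := by unfold Spec_sanitize_header; infer_instance

-- ===== CLAIM (what is proved, stated in full; the proofs are below) =====
def Claim_equal_sanitize_header : Prop := ∀ (text : String), Dom_sanitize_header text → Spec_sanitize_header text (sanitize_header text)

-- ===== LEMMAS AND PROOFS =====

-- maximal alphanumeric runs ("words") of a character list
def tokT : List Char → List (List Char)
  | [] => []
  | c :: rest =>
      if PySem.Chars.isalnum c then
        (c :: rest.takeWhile PySem.Chars.isalnum) :: tokT (rest.dropWhile PySem.Chars.isalnum)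
      else tokT rest
termination_by l => l.length
decreasing_by all_goals simp [List.length_dropWhile_le]

-- the characters A's loop appends, as a function of the prev_underscore flag
def body : Bool → List Char → List Char
  | _, [] => []
  | prev, c :: rest =>
      if PySem.Chars.isalnum c then c :: body false rest
      else if prev = false then '_' :: body true rest else body prev rest

-- words joined by single underscores
def joinU : List (List Char) → List Char
  | [] => []
  | [w] => w
  | w :: ws => w ++ '_' :: joinU ws

def leadU (l : List Char) : List Char :=
  match l.head? with
  | some c => if PySem.Chars.isalnum c then [] else ['_']
  | none => []

def endsSep (l : List Char) : Bool :=
  match l.getLast? with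
  | some c => !PySem.Chars.isalnum c
  | none => false

def trailU (l : List Char) : List Char :=
  if tokT l = [] then [] else if endsSep l then ['_'] else []

-- ---- character-class facts ----

lemma char_le_iff (a c : Char) : (a ≤ c) = (a.toNat ≤ c.toNat) := by
  rw [Char.le_def, UInt32.le_iff_toNat_le]; rfl

lemma al_not_space (c : Char) (h : PySem.Chars.isalnum c = true) : PySem.Chars.isspace c = false := by
  simp only [PySem.Chars.isalnum, PySem.Chars.isalpha, PySem.Chars.isdigit, PySem.Chars.isupper,
    PySem.Chars.islower, char_le_iff, Bool.or_eq_true, Bool.and_eq_true, decide_eq_true_eq] at h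
  simp only [PySem.Chars.isspace]
  simp only [Bool.or_eq_false_iff, Bool.and_eq_false_iff, decide_eq_false_iff_not]
  have h1 : 'A'.toNat = 65 := rfl
  have h2 : 'Z'.toNat = 90 := rfl
  have h3 : 'a'.toNat = 97 := rfl
  have h4 : 'z'.toNat = 122 := rfl
  have h5 : '0'.toNat = 48 := rfl
  have h6 : '9'.toNat = 57 := rfl
  omega

lemma space_not_al (c : Char) (h : PySem.Chars.isspace c = true) : PySem.Chars.isalnum c = false := by
  by_contra hc
  have := al_not_space c (by revert hc; cases PySem.Chars.isalnum c <;> simp)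
  rw [this] at h; exact Bool.false_ne_true h

lemma isupper_bounds (c : Char) (h : PySem.Chars.isupper c = true) :
    65 ≤ c.toNat ∧ c.toNat ≤ 90 := by
  simp only [PySem.Chars.isupper, char_le_iff, Bool.and_eq_true, decide_eq_true_eq] at h
  have h1 : 'A'.toNat = 65 := rfl
  have h2 : 'Z'.toNat = 90 := rfl
  omega

lemma lowerChar_toNat (c : Char) (h : PySem.Chars.isupper c = true) :
    (PySem.Chars.lowerChar c).toNat = c.toNat + 32 := by
  have hb := isupper_bounds c h
  simp only [PySem.Chars.lowerChar, h, if_true]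
  rw [Char.toNat_ofNat]
  have : (c.toNat + 32).isValidChar := by
    constructor
    omega
  simp [this]

lemma lowerChar_isspace (c : Char) :
    PySem.Chars.isspace (PySem.Chars.lowerChar c) = PySem.Chars.isspace c := by
  by_cases h : PySem.Chars.isupper c = true
  · have hb := isupper_bounds c h
    have ht := lowerChar_toNat c h
    have e1 : PySem.Chars.isspace (PySem.Chars.lowerChar c) = false := by
      simp only [PySem.Chars.isspace, ht]
      simp only [Bool.or_eq_false_iff, Bool.and_eq_false_iff, decide_eq_false_iff_not]
      omega
    have e2 : PySem.Chars.isspace c = false := by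
      simp only [PySem.Chars.isspace]
      simp only [Bool.or_eq_false_iff, Bool.and_eq_false_iff, decide_eq_false_iff_not]
      omega
    rw [e1, e2]
  · have h' : PySem.Chars.isupper c = false := by revert h; cases PySem.Chars.isupper c <;> simp
    simp [PySem.Chars.lowerChar, h']

-- ---- tokT structural lemmas ----

lemma tokT_cons_al (c : Char) (rest : List Char) (h : PySem.Chars.isalnum c = true) :
    tokT (c :: rest) =
      (c :: rest.takeWhile PySem.Chars.isalnum) :: tokT (rest.dropWhile PySem.Chars.isalnum) := by
  rw [tokT]; simp [h]

lemma tokT_cons_sep (c : Char) (rest : List Char) (h : PySem.Chars.isalnum c = false) :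
    tokT (c :: rest) = tokT rest := by
  rw [tokT]; simp [h]

lemma head_dropWhile_not (p : Char → Bool) (l : List Char) :
    ∀ d, (l.dropWhile p).head? = some d → p d = false := by
  induction l with
  | nil => intro d h; simp at h
  | cons c rest ih =>
      intro d h
      by_cases hc : p c = true
      · rw [List.dropWhile_cons_of_pos hc] at h; exact ih d h
      · rw [List.dropWhile_cons_of_neg (by simp [hc])] at h
        simp at h
        rw [← h]; simp [hc]

lemma take_drop_of_run (w x : List Char) (hw : ∀ c ∈ w, PySem.Chars.isalnum c = true)
    (hx : ∀ d, x.head? = some d → PySem.Chars.isalnum d = false) :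
    (w ++ x).takeWhile PySem.Chars.isalnum = w ∧ (w ++ x).dropWhile PySem.Chars.isalnum = x := by
  induction w with
  | nil =>
      simp only [List.nil_append]
      cases x with
      | nil => simp
      | cons d dr =>
          have hd := hx d (by simp)
          constructor
          · rw [List.takeWhile_cons_of_neg (by simp [hd])]
          · rw [List.dropWhile_cons_of_neg (by simp [hd])]
  | cons c w' ih =>
      have hc := hw c (by simp)
      have ih' := ih (fun c hc => hw c (by simp [hc]))
      constructor
      · rw [List.cons_append, List.takeWhile_cons_of_pos hc, ih'.1]
      · rw [List.cons_append, List.dropWhile_cons_of_pos hc, ih'.2]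

lemma tokT_eq_nil_iff (l : List Char) :
    tokT l = [] ↔ ∀ c ∈ l, PySem.Chars.isalnum c = false := by
  induction l using tokT.induct with
  | case1 => simp [tokT]
  | case2 c rest h ih =>
      rw [tokT_cons_al c rest h]
      simp only [List.cons_ne_nil, false_iff]
      intro hall
      have := hall c (by simp)
      rw [h] at this; exact absurd this (by simp)
  | case3 c rest h ih =>
      rw [tokT_cons_sep c rest (by revert h; cases PySem.Chars.isalnum c <;> simp)]
      rw [ih]
      constructor
      · intro hall d hd
        rcases List.mem_cons.mp hd with rfl | hd
        · revert h; cases PySem.Chars.isalnum d <;> simp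
        · exact hall d hd
      · intro hall d hd; exact hall d (by simp [hd])

lemma tokT_words (l : List Char) :
    ∀ w ∈ tokT l, w ≠ [] ∧ ∀ c ∈ w, PySem.Chars.isalnum c = true := by
  induction l using tokT.induct with
  | case1 => simp [tokT]
  | case2 c rest h ih =>
      rw [tokT_cons_al c rest h]
      intro w hw
      rcases List.mem_cons.mp hw with rfl | hw
      · refine ⟨by simp, ?_⟩
        intro d hd
        rcases List.mem_cons.mp hd with rfl | hd
        · exact h
        · exact List.mem_takeWhile_imp hd
      · exact ih w hw
  | case3 c rest h ih =>
      rw [tokT_cons_sep c rest (by revert h; cases PySem.Chars.isalnum c <;> simp)]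
      exact ih

lemma tokT_append_sep (x s : List Char) (hs : ∀ c ∈ s, PySem.Chars.isalnum c = false) :
    tokT (x ++ s) = tokT x := by
  induction x using tokT.induct with
  | case1 => simp [tokT]; exact (tokT_eq_nil_iff s).mpr hs
  | case2 c rest h ih =>
      set tw := rest.takeWhile PySem.Chars.isalnum with htw
      set dw := rest.dropWhile PySem.Chars.isalnum with hdw
      have hrest : rest = tw ++ dw := (List.takeWhile_append_dropWhile).symm
      have hwal : ∀ d ∈ tw, PySem.Chars.isalnum d = true := fun d hd => List.mem_takeWhile_imp hd
      have hdwh : ∀ d, dw.head? = some d → PySem.Chars.isalnum d = false :=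
        head_dropWhile_not _ rest
      have hxsh : ∀ d, (dw ++ s).head? = some d → PySem.Chars.isalnum d = false := by
        intro d hd
        cases hdwc : dw with
        | nil =>
            rw [hdwc] at hd; simp at hd
            exact hs d (List.mem_of_mem_head? hd)
        | cons e er =>
            rw [hdwc] at hd; simp at hd
            rw [← hd]; exact hdwh e (by rw [hdwc]; simp)
      have hts := take_drop_of_run tw (dw ++ s) hwal hxsh
      have step : (c :: rest) ++ s = c :: (tw ++ (dw ++ s)) := by
        simp [hrest]
      rw [step, tokT_cons_al c _ h, hts.1, hts.2, ih, tokT_cons_al c rest h, ← htw, ← hdw]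
  | case3 c rest h ih =>
      have h' : PySem.Chars.isalnum c = false := by revert h; cases PySem.Chars.isalnum c <;> simp
      rw [List.cons_append, tokT_cons_sep c _ h', ih, tokT_cons_sep c rest h']

lemma tokT_dropWhile_space (x : List Char) :
    tokT (x.dropWhile PySem.Chars.isspace) = tokT x := by
  induction x with
  | nil => simp
  | cons c rest ih =>
      by_cases hc : PySem.Chars.isspace c = true
      · rw [List.dropWhile_cons_of_pos hc, ih, tokT_cons_sep c rest (space_not_al c hc)]
      · rw [List.dropWhile_cons_of_neg (by simp [hc])]

lemma tokT_rstrip (m : List Char) : tokT (PySem.Chars.rstrip m) = tokT m := by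
  have hm : m = (m.reverse.dropWhile PySem.Chars.isspace).reverse ++
      (m.reverse.takeWhile PySem.Chars.isspace).reverse := by
    have h1 : m.reverse = m.reverse.takeWhile PySem.Chars.isspace ++
        m.reverse.dropWhile PySem.Chars.isspace := (List.takeWhile_append_dropWhile).symm
    calc m = m.reverse.reverse := (List.reverse_reverse m).symm
      _ = (m.reverse.takeWhile PySem.Chars.isspace ++
            m.reverse.dropWhile PySem.Chars.isspace).reverse := by rw [← h1]
      _ = _ := by rw [List.reverse_append]
  have hs : ∀ c ∈ (m.reverse.takeWhile PySem.Chars.isspace).reverse,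
      PySem.Chars.isalnum c = false := by
    intro c hc
    exact space_not_al c (List.mem_takeWhile_imp (List.mem_reverse.mp hc))
  calc tokT (PySem.Chars.rstrip m)
      = tokT ((m.reverse.dropWhile PySem.Chars.isspace).reverse) := rfl
    _ = tokT m := by
        conv_rhs => rw [hm]
        rw [tokT_append_sep _ _ hs]

lemma tokT_strip (m : List Char) : tokT (PySem.Chars.strip m) = tokT m := by
  unfold PySem.Chars.strip PySem.Chars.lstrip
  rw [tokT_rstrip, tokT_dropWhile_space]

lemma lower_strip_comm (cs : List Char) :
    PySem.Chars.lower (PySem.Chars.strip cs) = PySem.Chars.strip (PySem.Chars.lower cs) := by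
  unfold PySem.Chars.strip PySem.Chars.lstrip PySem.Chars.rstrip PySem.Chars.lower
  have hdw : ∀ (l : List Char),
      (l.map PySem.Chars.lowerChar).dropWhile PySem.Chars.isspace =
        (l.dropWhile PySem.Chars.isspace).map PySem.Chars.lowerChar := by
    intro l
    induction l with
    | nil => simp
    | cons c rest ih =>
        by_cases hc : PySem.Chars.isspace c = true
        · rw [List.map_cons, List.dropWhile_cons_of_pos (by rw [lowerChar_isspace]; exact hc),
            List.dropWhile_cons_of_pos hc, ih]
        · rw [List.map_cons, List.dropWhile_cons_of_neg (by rw [lowerChar_isspace]; simpa using hc),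
            List.dropWhile_cons_of_neg (by simpa using hc), List.map_cons]
  conv_rhs => rw [hdw cs]
  rw [← List.map_reverse, hdw, ← List.map_reverse]

-- ---- B's split₀.go computes tokT ----

lemma split_go_tokT (l : List Char) : ∀ (cur : List Char) (acc : List (List Char)),
    PySem.Chars.split₀.go
        (l.map (fun c => if PySem.Chars.isalnum c then c else ' ')) cur acc =
      acc.reverse ++
        (if cur.isEmpty then tokT l
         else (cur.reverse ++ l.takeWhile PySem.Chars.isalnum) ::
            tokT (l.dropWhile PySem.Chars.isalnum)) := by
  induction l with
  | nil =>
      intro cur acc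
      cases cur with
      | nil => simp [PySem.Chars.split₀.go, tokT]
      | cons c cr => simp [PySem.Chars.split₀.go, tokT]
  | cons c rest ih =>
      intro cur acc
      by_cases hc : PySem.Chars.isalnum c = true
      · have hns : PySem.Chars.isspace c = false := al_not_space c hc
        simp only [List.map_cons, hc, if_true]
        rw [PySem.Chars.split₀.go]
        simp only [hns, Bool.false_eq_true, if_false]
        rw [ih (c :: cur) acc]
        simp only [List.isEmpty_cons, List.reverse_cons]
        cases hcur : cur.isEmpty
        · simp only [Bool.false_eq_true, if_false]
          rw [List.takeWhile_cons_of_pos hc, List.dropWhile_cons_of_pos hc]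
          simp
        · have : cur = [] := List.isEmpty_iff.mp hcur
          subst this
          simp only [if_true]
          rw [tokT_cons_al c rest hc]
          simp
      · have hc' : PySem.Chars.isalnum c = false := by revert hc; cases PySem.Chars.isalnum c <;> simp
        simp only [List.map_cons, hc', Bool.false_eq_true, if_false]
        rw [PySem.Chars.split₀.go]
        have hsp : PySem.Chars.isspace ' ' = true := rfl
        simp only [hsp, if_true]
        cases hcur : cur.isEmpty
        · simp only [Bool.false_eq_true, if_false]
          rw [ih [] (cur.reverse :: acc)]
          have hcur' : cur ≠ [] := by simpa [List.isEmpty_iff] using hcur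
          simp only [List.isEmpty_nil, if_true, List.reverse_cons, hcur, Bool.false_eq_true,
            if_false]
          rw [List.takeWhile_cons_of_neg (by simp [hc']), List.dropWhile_cons_of_neg (by simp [hc']),
            tokT_cons_sep c rest hc']
          simp [tokT_cons_sep c rest hc']
        · have : cur = [] := List.isEmpty_iff.mp hcur
          subst this
          simp only [if_true]
          rw [ih [] acc]
          simp [tokT_cons_sep c rest hc']

-- ---- A's loop computes body ----

lemma foldl_body (l : List Char) : ∀ (chars : List Char) (prev : Bool),
    (l.foldl (fun (st : List Char × Bool) char =>
        if PySem.Chars.isalnum char then (st.1 ++ [char], false)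
        else if st.2 = false then (st.1 ++ ['_'], true) else st) (chars, prev)).1 =
      chars ++ body prev l := by
  induction l with
  | nil => intro chars prev; simp [body]
  | cons c rest ih =>
      intro chars prev
      by_cases hc : PySem.Chars.isalnum c = true
      · simp only [List.foldl_cons, hc, if_true, body]
        rw [ih]; simp
      · have hc' : PySem.Chars.isalnum c = false := by revert hc; cases PySem.Chars.isalnum c <;> simp
        cases prev
        · simp only [List.foldl_cons, hc', Bool.false_eq_true, if_false, body]
          rw [ih]; simp
        · simp only [List.foldl_cons, hc', Bool.false_eq_true, if_false, body]
          rw [ih]; simp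

lemma body_run (w x : List Char) (hw : ∀ c ∈ w, PySem.Chars.isalnum c = true) :
    body false (w ++ x) = w ++ body false x := by
  induction w with
  | nil => simp
  | cons c w' ih =>
      have hc := hw c (by simp)
      simp only [List.cons_append, body, hc, if_true]
      rw [ih (fun c hc => hw c (by simp [hc]))]

-- joinU of a nonempty-headed token list
lemma joinU_cons (w : List Char) (ws : List (List Char)) :
    joinU (w :: ws) = w ++ (if ws = [] then [] else '_' :: joinU ws) := by
  cases ws with
  | nil => simp [joinU]
  | cons v vs => simp [joinU]

-- the main characterisation of A's loop output
lemma body_spec (n : Nat) : ∀ (l : List Char), l.length ≤ n →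
    body true l = joinU (tokT l) ++ trailU l ∧
    body false l = leadU l ++ (joinU (tokT l) ++ trailU l) := by
  induction n with
  | zero =>
      intro l hl
      have : l = [] := List.eq_nil_of_length_eq_zero (Nat.le_zero.mp hl)
      subst this
      simp [body, tokT, trailU, leadU, joinU]
  | succ n ih =>
      intro l hl
      cases l with
      | nil => simp [body, tokT, trailU, leadU, joinU]
      | cons c rest =>
        by_cases hc : PySem.Chars.isalnum c = true
        · -- a word starts here
          set tw := rest.takeWhile PySem.Chars.isalnum with htw
          set dw := rest.dropWhile PySem.Chars.isalnum with hdw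
          have hrest : rest = tw ++ dw := (List.takeWhile_append_dropWhile).symm
          have hwal : ∀ d ∈ tw, PySem.Chars.isalnum d = true := fun d hd => List.mem_takeWhile_imp hd
          have hdwlen : dw.length ≤ n := by
            have h1 : dw.length ≤ rest.length := List.length_dropWhile_le _ _
            have h2 : rest.length + 1 ≤ n + 1 := by simpa using hl
            omega
          have ihdw := ih dw hdwlen
          have hbody : body true (c :: rest) = c :: (tw ++ body false dw) ∧
              body false (c :: rest) = c :: (tw ++ body false dw) := by
            constructor <;>
            · simp only [body, hc, if_true]
              rw [hrest, body_run tw dw hwal]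
          have htok : tokT (c :: rest) = (c :: tw) :: tokT dw := tokT_cons_al c rest hc
          have hlast : (c :: rest).getLast? = if dw = [] then (c :: tw).getLast? else dw.getLast? := by
            by_cases hdwe : dw = []
            · simp only [hdwe, if_true]
              have : (c :: rest) = (c :: tw) := by rw [hrest, hdwe]; simp
              rw [this]
            · simp only [hdwe, if_false]
              have : (c :: rest) = (c :: tw) ++ dw := by rw [hrest]; simp
              rw [this]
              exact List.getLast?_append_of_ne_nil (c :: tw) hdwe
          have hmain : c :: (tw ++ body false dw) =
              joinU (tokT (c :: rest)) ++ trailU (c :: rest) := by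
            rw [htok, joinU_cons]
            cases hdwe : dw with
            | nil =>
                have htr : trailU (c :: rest) = [] := by
                  unfold trailU
                  rw [htok]
                  simp only [List.cons_ne_nil, if_false]
                  have hes : endsSep (c :: rest) = false := by
                    unfold endsSep
                    rw [hlast, hdwe, if_pos rfl]
                    cases hgl : (c :: tw).getLast? with
                    | none => simp
                    | some d =>
                        have hd : d ∈ c :: tw := List.mem_of_getLast? hgl
                        have : PySem.Chars.isalnum d = true := by
                          rcases List.mem_cons.mp hd with rfl | hd
                          · exact hc
                          · exact hwal d hd
                        simp [this]
                  simp [hes]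
                rw [htr]
                simp [tokT, body]
            | cons d dr =>
                have hdrw : dw ≠ [] := by rw [hdwe]; simp
                rw [← hdwe]
                have hd : PySem.Chars.isalnum d = false := by
                  apply head_dropWhile_not PySem.Chars.isalnum rest
                  rw [← hdw, hdwe]; simp
                have hld : leadU dw = ['_'] := by
                  unfold leadU; rw [hdwe]; simp [hd]
                have htrd : (tokT dw ≠ [] ∧ trailU (c :: rest) = trailU dw) ∨
                    (tokT dw = [] ∧ trailU (c :: rest) = ['_'] ∧ trailU dw = []) := by
                  by_cases htde : tokT dw = []
                  · right
                    refine ⟨htde, ?_, by simp [trailU, htde]⟩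
                    unfold trailU
                    rw [htok]
                    simp only [List.cons_ne_nil, if_false]
                    have : endsSep (c :: rest) = true := by
                      unfold endsSep
                      rw [hlast, if_neg hdrw]
                      have hall := (tokT_eq_nil_iff dw).mp htde
                      cases hgl : dw.getLast? with
                      | none => exact absurd (List.getLast?_eq_none_iff.mp hgl) hdrw
                      | some e =>
                          have := hall e (List.mem_of_getLast? hgl)
                          simp [this]
                    simp [this]
                  · left
                    refine ⟨htde, ?_⟩
                    unfold trailU
                    rw [htok]
                    simp only [List.cons_ne_nil, if_false, htde]
                    have : endsSep (c :: rest) = endsSep dw := by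
                      unfold endsSep; rw [hlast, if_neg hdrw]
                    rw [this]
                rw [ihdw.2, hld]
                rcases htrd with ⟨htde, htr⟩ | ⟨htde, htr1, htr2⟩
                · rw [htr, if_neg htde]
                  simp
                · rw [htde, htr1, htr2]
                  simp [joinU]
          exact ⟨by rw [hbody.1, hmain], by
            rw [hbody.2, hmain]
            have : leadU (c :: rest) = [] := by unfold leadU; simp [hc]
            rw [this]; simp⟩
        · have hc' : PySem.Chars.isalnum c = false := by revert hc; cases PySem.Chars.isalnum c <;> simp
          have hrl : rest.length ≤ n := by
            have : (c :: rest).length = rest.length + 1 := by simp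
            omega
          have ihr := ih rest hrl
          have htok : tokT (c :: rest) = tokT rest := tokT_cons_sep c rest hc'
          have htr : trailU (c :: rest) = trailU rest := by
            unfold trailU
            rw [htok]
            by_cases hte : tokT rest = []
            · simp [hte]
            · simp only [hte, if_false]
              have hre : rest ≠ [] := by
                intro h; subst h; simp [tokT] at hte
              have : endsSep (c :: rest) = endsSep rest := by
                obtain ⟨e, er, rfl⟩ := List.exists_cons_of_ne_nil hre
                unfold endsSep
                rw [List.getLast?_cons_cons]
              rw [this]
          constructor
          · rw [show body true (c :: rest) = body true rest from by simp [body, hc'],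
              ihr.1, htok, htr]
          · rw [show body false (c :: rest) = '_' :: body true rest from by simp [body, hc'],
              ihr.1, htok, htr]
            have : leadU (c :: rest) = ['_'] := by unfold leadU; simp [hc']
            rw [this]; simp

-- last character of a joined token list is alphanumeric
lemma joinU_getLast (ws : List (List Char)) :  ws ≠ [] →
    (∀ w ∈ ws, w ≠ [] ∧ ∀ c ∈ w, PySem.Chars.isalnum c = true) →
    ∃ c, (joinU ws).getLast? = some c ∧ PySem.Chars.isalnum c = true := by
  induction ws with
  | nil => intro hne _; exact absurd rfl hne
  | cons w vs ih =>
      intro hne hws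
      cases vs with
      | nil =>
          have hw := hws w (by simp)
          simp only [joinU]
          cases hgl : w.getLast? with
          | none => exact absurd (List.getLast?_eq_none_iff.mp hgl) hw.1
          | some c => exact ⟨c, rfl, hw.2 c (List.mem_of_getLast? hgl)⟩
      | cons v vs' =>
          obtain ⟨c, hc1, hc2⟩ := ih (by simp) (fun w hw => hws w (by simp [hw]))
          refine ⟨c, ?_, hc2⟩
          have hvne : joinU (v :: vs') ≠ [] := by
            intro h
            rw [h] at hc1; simp at hc1
          obtain ⟨x, xs, hx⟩ := List.exists_cons_of_ne_nil hvne
          rw [hx] at hc1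
          rw [joinU_cons, if_neg (by simp), List.getLast?_append_of_ne_nil w (by simp), hx,
            List.getLast?_cons_cons]
          exact hc1

-- stripping underscores from A's raw output gives the joined tokens
lemma strip_body (l : List Char) :
    PySem.Chars.stripChars (body false l) ['_'] = joinU (tokT l) := by
  have hb := (body_spec l.length l le_rfl).2
  unfold PySem.Chars.stripChars
  by_cases hte : tokT l = []
  · have htr : trailU l = [] := by simp [trailU, hte]
    rw [hb, hte, htr]
    cases l with
    | nil => simp [leadU, joinU]
    | cons c rest =>
        have hc : PySem.Chars.isalnum c = false := by
          exact (tokT_eq_nil_iff (c :: rest)).mp hte c (by simp)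
        have : leadU (c :: rest) = ['_'] := by unfold leadU; simp [hc]
        rw [this]
        simp [joinU]
  · obtain ⟨w, ws, hws⟩ := List.exists_cons_of_ne_nil hte
    have hwords := tokT_words l
    have hJne : joinU (tokT l) ≠ [] := by
      rw [hws, joinU_cons]
      have := (hwords w (by simp [hws])).1
      simp [this]
    obtain ⟨d, hd1, hd2⟩ := joinU_getLast (tokT l) hte hwords
    have hdu : ('_' :: []).contains d = false := by
      have : d ≠ '_' := by
        intro h; subst h; exact absurd hd2 (by simp [show PySem.Chars.isalnum '_' = false from rfl])
      simp [this]
    -- head of joinU is alphanumeric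
    have hhead : ∃ e, (joinU (tokT l)).head? = some e ∧ PySem.Chars.isalnum e = true := by
      rw [hws, joinU_cons]
      have hw := hwords w (by simp [hws])
      obtain ⟨e, es, hes⟩ := List.exists_cons_of_ne_nil hw.1
      refine ⟨e, ?_, hw.2 e (by simp [hes])⟩
      rw [hes]; simp
    obtain ⟨e, he1, he2⟩ := hhead
    have heu : ('_' :: []).contains e = false := by
      have : e ≠ '_' := by
        intro h; subst h; exact absurd he2 (by simp [show PySem.Chars.isalnum '_' = false from rfl])
      simp [this]
    rw [hb]
    show (List.dropWhile (fun c => (['_'] : List Char).contains c)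
        (List.dropWhile (fun c => (['_'] : List Char).contains c)
          (leadU l ++ (joinU (tokT l) ++ trailU l))).reverse).reverse = joinU (tokT l)
    -- first dropWhile removes leadU then stops at the alnum head
    have hdrop1 : (leadU l ++ (joinU (tokT l) ++ trailU l)).dropWhile
        (fun c => (['_'] : List Char).contains c) = joinU (tokT l) ++ trailU l := by
      have hstep : (joinU (tokT l) ++ trailU l).dropWhile
          (fun c => (['_'] : List Char).contains c) = joinU (tokT l) ++ trailU l := by
        obtain ⟨J', hJ'⟩ := List.exists_cons_of_ne_nil hJne
        obtain ⟨Js, hJs⟩ := hJ'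
        rw [hJs] at he1 ⊢
        simp at he1
        rw [List.cons_append, List.dropWhile_cons_of_neg]
        rw [← he1] at heu
        simpa using heu
      cases l with
      | nil =>
          rw [show leadU ([] : List Char) = [] from rfl]
          simpa using hstep
      | cons c rest =>
          rw [show leadU (c :: rest) = if PySem.Chars.isalnum c = true then [] else ['_'] from rfl]
          by_cases hcl : PySem.Chars.isalnum c = true
          · rw [if_pos hcl]
            simpa using hstep
          · rw [if_neg hcl, List.cons_append, List.dropWhile_cons_of_pos (by simp)]
            exact hstep
    rw [hdrop1]
    -- second dropWhile on the reverse removes trailU then stops at the alnum last char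
    have hrev : (joinU (tokT l) ++ trailU l).reverse =
        (trailU l).reverse ++ (joinU (tokT l)).reverse := by simp
    rw [hrev]
    have hstep2 : ((joinU (tokT l)).reverse).dropWhile
        (fun c => (['_'] : List Char).contains c) = (joinU (tokT l)).reverse := by
      obtain ⟨J', Js, hJs⟩ := List.exists_cons_of_ne_nil (by
        simpa using hJne : (joinU (tokT l)).reverse ≠ [])
      rw [hJs, List.dropWhile_cons_of_neg]
      have : (joinU (tokT l)).reverse.head? = some J' := by rw [hJs]; simp
      rw [List.head?_reverse] at this
      rw [hd1] at this
      simp at this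
      rw [this] at hdu
      simpa using hdu
    have hdrop2 : ((trailU l).reverse ++ (joinU (tokT l)).reverse).dropWhile
        (fun c => (['_'] : List Char).contains c) = (joinU (tokT l)).reverse := by
      unfold trailU
      simp only [hte, if_false]
      cases endsSep l
      · simpa using hstep2
      · simp only [if_true]
        rw [show (['_'] : List Char).reverse = ['_'] from rfl, List.cons_append,
          List.dropWhile_cons_of_pos (by simp)]
        exact hstep2
    rw [hdrop2]
    simp

lemma join_eq_joinU (ws : List (List Char)) : PySem.Chars.join ['_'] ws = joinU ws := by
  induction ws with
  | nil => rfl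
  | cons w vs ih =>
      cases vs with
      | nil => simp [PySem.Chars.join, joinU, List.intercalate]
      | cons v vs' =>
          unfold PySem.Chars.join at ih ⊢
          rw [show joinU (w :: v :: vs') = w ++ '_' :: joinU (v :: vs') from rfl, ← ih]
          simp [List.intercalate]

lemma strip_lower_toList (text : String) :
    (PySem.Str.lower (PySem.Str.strip text)).toList =
      PySem.Chars.lower (PySem.Chars.strip text.toList) := by
  simp [PySem.Str.lower, PySem.Str.strip]

lemma portA_val (text : String) :
    sanitize_header text =
      (if String.ofList (joinU (tokT (PySem.Chars.lower text.toList))) = "" then "field"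
       else String.ofList (joinU (tokT (PySem.Chars.lower text.toList)))) := by
  simp only [sanitize_header]
  have h1 := foldl_body (PySem.Str.lower (PySem.Str.strip text)).toList [] false
  simp only [List.nil_append] at h1
  rw [h1, strip_lower_toList]
  have h2 : PySem.Str.stripChars
      (String.ofList (body false (PySem.Chars.lower (PySem.Chars.strip text.toList)))) "_" =
      String.ofList (joinU (tokT (PySem.Chars.lower text.toList))) := by
    unfold PySem.Str.stripChars
    rw [show ("_" : String).toList = ['_'] from rfl]
    rw [String.toList_ofList, strip_body, lower_strip_comm, tokT_strip]
  rw [h2]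

lemma portB_val (text : String) :
    sanitize_header_alt text =
      (if String.ofList (joinU (tokT (PySem.Chars.lower text.toList))) = "" then "field"
       else String.ofList (joinU (tokT (PySem.Chars.lower text.toList)))) := by
  simp only [sanitize_header_alt]
  have hlow : (PySem.Str.lower text).toList = PySem.Chars.lower text.toList := by
    simp [PySem.Str.lower]
  have hsplit : PySem.Str.split₀ (String.ofList ((PySem.Str.lower text).toList.map
      (fun c => if PySem.Chars.isalnum c then c else ' '))) =
      (tokT (PySem.Chars.lower text.toList)).map String.ofList := by
    unfold PySem.Str.split₀
    rw [String.toList_ofList, hlow]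
    unfold PySem.Chars.split₀
    rw [split_go_tokT (PySem.Chars.lower text.toList) [] []]
    simp only [List.reverse_nil, List.isEmpty_nil, if_true, List.nil_append]
  rw [hsplit]
  have hjoin : PySem.Str.join "_" ((tokT (PySem.Chars.lower text.toList)).map String.ofList) =
      String.ofList (joinU (tokT (PySem.Chars.lower text.toList))) := by
    unfold PySem.Str.join
    rw [show ("_" : String).toList = ['_'] from rfl]
    have hid : ∀ ws : List (List Char), (ws.map String.ofList).map String.toList = ws := by
      intro ws
      induction ws with
      | nil => rfl
      | cons w t ih => simp [ih]
    have := hid (tokT (PySem.Chars.lower text.toList))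
    rw [this, join_eq_joinU]
  rw [hjoin]

-- ===== VERDICT (by name: the statement is the Claim_ definition above) =====
theorem sanitize_header_spec : Claim_equal_sanitize_header := by
  intro text _
  unfold Spec_sanitize_header
  rw [portA_val, portB_val]
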